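-- pv_equiv track=rewrite | github.com/Storvild/xml_to_json_flat | xml_to_json_flat.py | _json_fields_sync
-- ===== SOURCE A (Python) =====
-- def _json_fields_sync(inlist):
--     """ Синхронизация колонок (приведение к одинаковому количеству во всех строках) """
--     res = []
--     fields = set()
--     for rec in inlist:
--         fields.update(rec.keys())
--     for rec in inlist:
--         new_rec = {}
--         for fieldname in fields:
--             if fieldname in rec:
--                 new_rec[fieldname] = rec[fieldname]
--             else:
--                 new_rec[fieldname] = None
--         res.append(new_rec)
--     return res
-- ===== SOURCE B (Python) =====
-- def _json_fields_sync(inlist):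
--     """ Columnar rebuild: gather the union of keys, materialize one column of
--     values per field (rec.get fills missing slots with None), then zip the
--     columns back together into one dict per row. """
--     fields = set()
--     for rec in inlist:
--         fields.update(rec.keys())
--     flist = list(fields)
--     cols = [[rec.get(f) for rec in inlist] for f in flist]
--     return [dict(zip(flist, (col[i] for col in cols))) for i in range(len(inlist))]
-- ===== Notes on version B (the rewrite author's own statement) =====
-- stated objective: alternative
-- what changed: Replaces A's row-wise fill (per record, loop over all fields with a membership test and branch) by a column-wise transpose: one value column per field is materialized with rec.get, and rows are then reassembled by zipping the columns back into dicts.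
import Mathlib
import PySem

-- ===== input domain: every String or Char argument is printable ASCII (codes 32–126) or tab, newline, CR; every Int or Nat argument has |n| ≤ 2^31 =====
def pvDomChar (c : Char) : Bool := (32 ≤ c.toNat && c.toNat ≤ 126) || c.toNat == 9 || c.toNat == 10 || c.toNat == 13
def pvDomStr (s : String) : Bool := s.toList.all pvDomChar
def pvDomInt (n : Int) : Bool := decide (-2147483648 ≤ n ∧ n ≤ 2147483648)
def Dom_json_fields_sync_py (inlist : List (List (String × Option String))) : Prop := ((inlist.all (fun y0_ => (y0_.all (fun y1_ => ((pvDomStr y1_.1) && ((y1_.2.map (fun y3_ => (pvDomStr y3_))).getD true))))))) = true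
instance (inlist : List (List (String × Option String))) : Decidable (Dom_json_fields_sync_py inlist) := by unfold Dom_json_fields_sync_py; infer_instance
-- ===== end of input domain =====

-- B rebuilds the table column-wise (one value column per field via rec.get, then zips columns back into row dicts) instead of A's row-wise fill with a per-field membership branch; equal on all inputs.


-- each inner list encodes a Python dict (its items in insertion order); both ports read it through
-- PySem.Dict.ofList, which is exactly dict(pairs)
def pvAsDict (rec : List (String × Option String)) : PySem.Dict String (Option String) :=
  PySem.Dict.ofList rec

-- fields = set(); for rec in inlist: fields.update(rec.keys())   (first phase, identical in A and B)
def pvFields (inlist : List (List (String × Option String))) : PySem.Set String :=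
  inlist.foldl (fun s rec => PySem.Set.update s (pvAsDict rec).keys) PySem.Set.empty

-- ===== PORT A =====
def json_fields_sync_py (inlist : List (List (String × Option String))) : List (List (String × Option String)) :=
  let fields := pvFields inlist
  let res := inlist.foldl (fun res rec =>
    let d := pvAsDict rec
    let newRec := fields.foldl
      (fun (nr : PySem.Dict String (Option String)) fieldname =>
        if d.contains fieldname then nr.insert fieldname (d.getD fieldname none)
        else nr.insert fieldname none)
      PySem.Dict.empty
    res ++ [newRec.items]) []
  res

-- ===== PORT B =====
-- flist := list(fields); cols: one column per field (rec.get(f), i.e. getD … none);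
-- rows: dict(zip(flist, i-th entry of every column)) for i in range(len(inlist))
def json_fields_sync_py_alt (inlist : List (List (String × Option String))) : List (List (String × Option String)) :=
  let fields := pvFields inlist
  let flist : List String := fields
  let cols : List (List (Option String)) :=
    flist.map (fun f => inlist.map (fun rec => (pvAsDict rec).getD f none))
  (PySem.List.pyRange 0 (inlist.length : Int) 1).map (fun i =>
    (PySem.Dict.ofList (flist.zip (cols.map (fun col => PySem.List.pyGetD col i none)))).items)

-- ===== PRECONDITION & SPEC =====
def Spec_json_fields_sync_py (inlist : List (List (String × Option String))) (out : List (List (String × Option String))) : Prop := out = json_fields_sync_py_alt inlist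
instance (inlist : List (List (String × Option String))) (out : List (List (String × Option String))) : Decidable (Spec_json_fields_sync_py inlist out) := by unfold Spec_json_fields_sync_py; infer_instance

-- ===== CLAIM (what is proved, stated in full; the proofs are below) =====
def Claim_equal_json_fields_sync_py : Prop := ∀ (inlist : List (List (String × Option String))), Dom_json_fields_sync_py inlist → Spec_json_fields_sync_py inlist (json_fields_sync_py inlist)

-- ===== LEMMAS AND PROOFS =====

-- fields has no duplicates (built by Set.update from the empty set)
lemma pvFields_nodup (inlist : List (List (String × Option String))) : (pvFields inlist).Nodup := by
  unfold pvFields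
  suffices h : ∀ (s : PySem.Set String), s.Nodup →
      (inlist.foldl (fun s rec => PySem.Set.update s (pvAsDict rec).keys) s).Nodup by
    exact h PySem.Set.empty List.nodup_nil
  induction inlist with
  | nil => intro s hs; exact hs
  | cons r l ih => intro s hs; exact ih _ (PySem.Set.nodup_update _ _ hs)

-- per-record value of A: the field loop with the membership branch, as an explicit map over fields
lemma a_rec_items (F : List String) (hF : F.Nodup)
    (d : PySem.Dict String (Option String)) :
    (F.foldl (fun (nr : PySem.Dict String (Option String)) fieldname =>
        if d.contains fieldname then nr.insert fieldname (d.getD fieldname none)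
        else nr.insert fieldname none) PySem.Dict.empty).items
      = F.map (fun f => (f, d.getD f none)) := by
  rw [PySem.List.foldl_congr_mem F _ (fun nr fieldname => nr.insert fieldname (d.getD fieldname none)) _
      (by
        intro nr f _
        show (if d.contains f = true then nr.insert f (d.getD f none)
              else nr.insert f none) = nr.insert f (d.getD f none)
        cases hc : d.contains f with
        | true => simp
        | false => rw [if_neg (by simp), PySem.Dict.getD_of_not_contains d none hc])]
  have := PySem.Dict.items_foldl_insert_fresh (l := F) (k := id)
    (v := fun f => d.getD f none) (d := PySem.Dict.empty)
    (by intro a _; rfl) (by simpa using hF)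
  simpa using this

-- a dict built from distinct-key pairs lists exactly those pairs as its items
lemma items_ofList_map (F : List String) (hF : F.Nodup) (h : String → Option String) :
    (PySem.Dict.ofList (F.map (fun f => (f, h f)))).items = F.map (fun f => (f, h f)) := by
  show ((F.map (fun f => (f, h f))).foldl (fun d p => d.insert p.1 p.2) PySem.Dict.empty).items = _
  rw [List.foldl_map]
  have := PySem.Dict.items_foldl_insert_fresh (l := F) (k := id)
    (v := fun f => h f) (d := PySem.Dict.empty)
    (by intro a _; rfl) (by simpa using hF)
  simpa using this

-- reassembling rows by index from a per-element function is the plain map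
lemma map_range_getD {α β : Type} (l : List α) (d : α) (F : α → β) :
    (List.range l.length).map (fun i => F (l.getD i d)) = l.map F := by
  apply List.ext_getElem
  · simp
  · intro j h1 h2
    simp [List.getD_eq_getElem?_getD, List.getElem?_eq_getElem (by simpa using h2)]

-- ===== VERDICT (by name: the statement is the Claim_ definition above) =====
theorem json_fields_sync_py_spec : Claim_equal_json_fields_sync_py := by
  intro inlist _
  show json_fields_sync_py inlist = json_fields_sync_py_alt inlist
  unfold json_fields_sync_py json_fields_sync_py_alt
  simp only [PySem.List.foldl_append_singleton_eq_map, List.nil_append,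
    PySem.List.pyRange_zero_natCast]
  have hrow : ∀ i : Nat, i < inlist.length →
      (PySem.Dict.ofList ((pvFields inlist : List String).zip
        (((pvFields inlist : List String).map
            (fun f => inlist.map (fun rec => (pvAsDict rec).getD f none))).map
          (fun col => PySem.List.pyGetD col (i : Int) none)))).items
      = (pvFields inlist : List String).map
          (fun f => (f, (pvAsDict (inlist.getD i [])).getD f none)) := by
    intro i hi
    rw [List.map_map]
    have hcol : ((pvFields inlist : List String).map
        ((fun col => PySem.List.pyGetD col (i : Int) none) ∘
          (fun f => inlist.map (fun rec => (pvAsDict rec).getD f none))))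
        = (pvFields inlist : List String).map
            (fun f => (pvAsDict (inlist.getD i [])).getD f none) := by
      apply List.map_congr_left
      intro f _
      show PySem.List.pyGetD (inlist.map (fun rec => (pvAsDict rec).getD f none)) (i : Int) none
          = (pvAsDict (inlist.getD i [])).getD f none
      rw [PySem.List.pyGetD_natCast]
      simp [List.getD_eq_getElem?_getD, List.getElem?_eq_getElem hi]
    rw [hcol]
    have hz : (pvFields inlist : List String).zip
        ((pvFields inlist : List String).map (fun f => (pvAsDict (inlist.getD i [])).getD f none))
        = (pvFields inlist : List String).map
            (fun f => (f, (pvAsDict (inlist.getD i [])).getD f none)) := by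
      have := List.zip_map' (f := (id : String → String))
        (g := fun f => (pvAsDict (inlist.getD i [])).getD f none)
        (l := (pvFields inlist : List String))
      simpa using this
    rw [hz, items_ofList_map _ (pvFields_nodup inlist)]
  calc inlist.map (fun rec =>
        ((pvFields inlist).foldl
          (fun (nr : PySem.Dict String (Option String)) fieldname =>
            if (pvAsDict rec).contains fieldname then
              nr.insert fieldname ((pvAsDict rec).getD fieldname none)
            else nr.insert fieldname none) PySem.Dict.empty).items)
      = inlist.map (fun rec => (pvFields inlist : List String).map
          (fun f => (f, (pvAsDict rec).getD f none))) := by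
        apply List.map_congr_left
        intro rec _
        exact a_rec_items _ (pvFields_nodup inlist) _
    _ = (List.range inlist.length).map (fun i => (pvFields inlist : List String).map
          (fun f => (f, (pvAsDict (inlist.getD i [])).getD f none))) := by
        rw [map_range_getD inlist []
          (fun rec => (pvFields inlist : List String).map
            (fun f => (f, (pvAsDict rec).getD f none)))]
    _ = _ := by
        rw [List.map_map]
        apply List.map_congr_left
        intro i hi
        exact (hrow i (by simpa using hi)).symm
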